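-- pv_equiv track=rewrite | github.com/kyucchoi/python-algorithm | level0/수열과_구간_쿼리_2/solution.py | solution
-- ===== SOURCE A (Python) =====
-- def solution(arr, queries):
--     result = []  # 결과를 저장할 리스트
--
--     for s, e, k in queries:
--         min_value = float('inf')  # 최솟값을 찾기 위한 초기값
--
--         # s부터 e까지 범위 확인
--         for i in range(s, e + 1):
--             if arr[i] > k and arr[i] < min_value:
--                 min_value = arr[i]
--
--         # k보다 큰 값을 찾지 못한 경우
--         if min_value == float('inf'):
--             result.append(-1)
--         else:
--             result.append(min_value)
--
--     return result
-- ===== SOURCE B (Python) =====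
-- def solution(arr, queries):
--     result = []
--     for s, e, k in queries:
--         ans = -1
--         for v in sorted(arr[s:e + 1]):
--             if v > k:
--                 ans = v
--                 break
--         result.append(ans)
--     return result
-- ===== Notes on version B (the rewrite author's own statement) =====
-- stated objective: alternative
-- what changed: B replaces A's per-index loop with a running minimum-above-k and an inf sentinel by slicing the queried range, sorting it, and taking the first element greater than k.
-- outside the precondition, e.g. on solution([1, 2, 3], [(-2, 2, 0)]): A returns [1], B returns [2]; on solution([1, 2, 3], [(1, -2, 0)]): A returns [-1], B returns [2]
import Mathlib
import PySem

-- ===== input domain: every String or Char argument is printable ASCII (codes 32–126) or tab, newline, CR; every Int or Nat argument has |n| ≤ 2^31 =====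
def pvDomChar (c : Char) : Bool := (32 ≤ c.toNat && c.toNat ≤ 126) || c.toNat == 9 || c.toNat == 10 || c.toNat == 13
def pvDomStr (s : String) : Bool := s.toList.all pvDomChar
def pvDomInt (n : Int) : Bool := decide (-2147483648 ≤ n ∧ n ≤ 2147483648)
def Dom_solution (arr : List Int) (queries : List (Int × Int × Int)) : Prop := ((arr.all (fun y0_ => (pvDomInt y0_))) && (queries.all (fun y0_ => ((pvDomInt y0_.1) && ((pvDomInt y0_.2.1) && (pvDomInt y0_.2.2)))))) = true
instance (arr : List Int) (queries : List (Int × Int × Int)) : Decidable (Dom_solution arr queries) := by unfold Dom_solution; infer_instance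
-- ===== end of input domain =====

-- B replaces A's per-index running-minimum-above-k loop by slicing the queried range,
-- sorting it, and taking the first element greater than k (objective: alternative decomposition; equal cost class).

-- ===== PORT A =====
def solution (arr : List Int) (queries : List (Int × Int × Int)) : List Int :=
  queries.foldl (fun result q =>
    let mv : Option Int :=
      (PySem.List.pyRange q.1 (q.2.1 + 1) 1).foldl (fun mv i =>
        let v := PySem.List.pyGetD arr i 0   -- arr[i]; default unreachable under Pre_
        match mv with
        | none => if q.2.2 < v then some v else none
        | some m => if q.2.2 < v ∧ v < m then some v else some m) none
    result ++ [match mv with | none => -1 | some m => m]) []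

-- ===== PORT B =====
def solution_alt (arr : List Int) (queries : List (Int × Int × Int)) : List Int :=
  queries.foldl (fun result q =>
    let window := PySem.List.sorted (PySem.List.slice arr (some q.1) (some (q.2.1 + 1))) (fun x => x) false
    let ans := (window.find? (fun v => decide (q.2.2 < v))).getD (-1)
    result ++ [ans]) []

-- ===== PRECONDITION & SPEC =====
-- Pre_ restricts queries to the natural domain of range queries: 0 <= s, -1 <= e, and the
-- range in bounds when nonempty.  It excludes negative-index queries on which A either raises
-- (IndexError once the per-element wraparound leaves the list) or returns a value produced by
-- per-element wraparound, a corner where B's slice reading (count from the end) is equally defensible.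
def Pre_solution (arr : List Int) (queries : List (Int × Int × Int)) : Prop :=
  ∀ q ∈ queries, 0 ≤ q.1 ∧ -1 ≤ q.2.1 ∧ (q.2.1 < q.1 ∨ q.2.1 < (arr.length : Int))
instance (arr : List Int) (queries : List (Int × Int × Int)) : Decidable (Pre_solution arr queries) := by unfold Pre_solution; infer_instance
def pvWitness_solution : List Int × (List (Int × Int × Int)) := ([1, 5, 2, 7], [(0, 3, 2), (1, 2, 9), (2, 1, 0), (0, -1, 0)])
def Spec_solution (arr : List Int) (queries : List (Int × Int × Int)) (out : List Int) : Prop := out = solution_alt arr queries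
instance (arr : List Int) (queries : List (Int × Int × Int)) (out : List Int) : Decidable (Spec_solution arr queries out) := by unfold Spec_solution; infer_instance

-- ===== CLAIM (what is proved, stated in full; the proofs are below) =====
def Claim_equal_solution : Prop := ∀ (arr : List Int) (queries : List (Int × Int × Int)), Dom_solution arr queries → Pre_solution arr queries → Spec_solution arr queries (solution arr queries)

-- ===== LEMMAS AND PROOFS =====

-- A's inner loop body, on the value already fetched
def pvStep (k : Int) (mv : Option Int) (v : Int) : Option Int :=
  match mv with
  | none => if k < v then some v else none
  | some m => if k < v ∧ v < m then some v else some m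

-- foldl min as Option.elim of min?
theorem pvFoldlMin_elim (v : Int) (t : List Int) :
    t.foldl min v = t.min?.elim v (min v) := by
  induction t generalizing v with
  | nil => simp
  | cons a t ih =>
    simp only [List.foldl_cons, ih, List.min?_cons]
    cases t.min? <;> simp [min_assoc]

-- characterisation of A's running-minimum fold
theorem pvFoldStep_char (k : Int) (l : List Int) (acc : Option Int) :
    l.foldl (pvStep k) acc =
      (match acc with
       | none => (l.filter (fun v => decide (k < v))).min?
       | some m => some ((l.filter (fun v => decide (k < v))).foldl min m)) := by
  induction l generalizing acc with
  | nil => cases acc <;> simp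
  | cons v t ih =>
    cases acc with
    | none =>
      by_cases hv : k < v
      · rw [List.foldl_cons]
        have hstep : pvStep k none v = some v := by simp [pvStep, hv]
        rw [hstep, ih]
        simp [hv, pvFoldlMin_elim]
      · simp [pvStep, hv, ih]
    | some m =>
      by_cases hv : k < v
      · by_cases hm : v < m
        · have : min m v = v := by omega
          simp [pvStep, hv, hm, ih, this]
        · have : min m v = m := by omega
          simp [pvStep, hv, hm, ih, this]
      · simp [pvStep, hv, ih]

-- first match is head of filter
theorem pvFind_eq_head_filter (p : Int → Bool) (l : List Int) :
    l.find? p = (l.filter p).head? := by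
  induction l with
  | nil => simp
  | cons x t ih =>
    by_cases hx : p x = true
    · rw [List.find?_cons_of_pos hx, List.filter_cons_of_pos hx]
      simp
    · rw [List.find?_cons_of_neg hx, List.filter_cons_of_neg (by simpa using hx), ih]

-- head of a sorted-ascending list is its minimum, transported along a permutation
theorem pvHead_sorted_filter_eq_min? (p : Int → Bool) (l : List Int) :
    ((PySem.List.sorted l (fun x => x) false).filter p).head? = (l.filter p).min? := by
  have hperm : ((PySem.List.sorted l (fun x => x) false).filter p).Perm (l.filter p) :=
    (PySem.List.sorted_perm l (fun x => x) false).filter p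
  have hpw : ((PySem.List.sorted l (fun x => x) false).filter p).Pairwise (· ≤ ·) :=
    (PySem.List.sorted_pairwise l (fun x => x)).filter p
  cases hf : (PySem.List.sorted l (fun x => x) false).filter p with
  | nil =>
    rw [hf] at hperm
    have h0 : l.filter p = [] := hperm.symm.eq_nil
    simp [h0]
  | cons a t =>
    rw [hf] at hperm hpw
    symm
    rw [List.head?_cons, List.min?_eq_some_iff]
    constructor
    · exact hperm.mem_iff.mp (by simp)
    · intro b hb
      have hb' : b ∈ a :: t := hperm.mem_iff.mpr hb
      rcases List.mem_cons.mp hb' with h | h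
      · omega
      · exact (List.pairwise_cons.mp hpw).1 b h

-- the values A visits are exactly B's slice
theorem pvRange_map_eq_slice (arr : List Int) (s e : Int)
    (hs : 0 ≤ s) (he : -1 ≤ e) (hb : e < s ∨ e < (arr.length : Int)) :
    (PySem.List.pyRange s (e + 1) 1).map (fun i => PySem.List.pyGetD arr i 0) =
      PySem.List.slice arr (some s) (some (e + 1)) := by
  by_cases hes : e < s
  · rw [PySem.List.pyRange_one_eq_nil (by omega), PySem.List.slice_toNat arr hs (by omega)]
    have h0 : (e + 1).toNat - s.toNat = 0 := by omega
    simp [h0]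
  · have hlen : e < (arr.length : Int) := hb.resolve_left hes
    rw [PySem.List.slice_toNat arr hs (by omega)]
    apply List.ext_getElem
    · simp [PySem.List.length_pyRange_one]
      omega
    · intro j h1 h2
      have hj : (j : Int) < e + 1 - s := by
        simp [PySem.List.length_pyRange_one] at h1
        omega
      simp only [List.getElem_map]
      rw [PySem.List.getElem_pyRange_one _ _ _ (by simpa using h1)]
      rw [PySem.List.pyGetD_eq_getElem arr 0 (by omega) (by omega)]
      rw [List.getElem_take, List.getElem_drop]
      have hidx : (s + (j : Int)).toNat = s.toNat + j := by omega
      simp only [hidx]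

-- per-query equality
theorem pvQuery_eq (arr : List Int) (s e k : Int)
    (hs : 0 ≤ s) (he : -1 ≤ e) (hb : e < s ∨ e < (arr.length : Int)) :
    (match (PySem.List.pyRange s (e + 1) 1).foldl (fun mv i =>
        let v := PySem.List.pyGetD arr i 0
        match mv with
        | none => if k < v then some v else none
        | some m => if k < v ∧ v < m then some v else some m) none with
      | none => (-1 : Int) | some m => m) =
    (((PySem.List.sorted (PySem.List.slice arr (some s) (some (e + 1))) (fun x => x) false).find?
        (fun v => decide (k < v))).getD (-1)) := by
  have hmap := pvRange_map_eq_slice arr s e hs he hb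
  rw [pvFind_eq_head_filter, pvHead_sorted_filter_eq_min?]
  rw [show (fun (mv : Option Int) (i : Int) =>
        let v := PySem.List.pyGetD arr i 0
        match mv with
        | none => if k < v then some v else none
        | some m => if k < v ∧ v < m then some v else some m)
      = (fun mv i => pvStep k mv (PySem.List.pyGetD arr i 0)) from rfl]
  rw [← List.foldl_map (f := fun i => PySem.List.pyGetD arr i 0) (g := pvStep k)]
  rw [hmap, pvFoldStep_char]
  cases ((PySem.List.slice arr (some s) (some (e + 1))).filter (fun v => decide (k < v))).min? <;> simp

-- ===== VERDICT (by name: the statement is the Claim_ definition above) =====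
-- the per-query results, named so the outer folds can be rewritten to maps
def pvQA (arr : List Int) (q : Int × Int × Int) : Int :=
  match (PySem.List.pyRange q.1 (q.2.1 + 1) 1).foldl (fun mv i =>
      let v := PySem.List.pyGetD arr i 0
      match mv with
      | none => if q.2.2 < v then some v else none
      | some m => if q.2.2 < v ∧ v < m then some v else some m) none with
  | none => -1
  | some m => m

def pvQB (arr : List Int) (q : Int × Int × Int) : Int :=
  ((PySem.List.sorted (PySem.List.slice arr (some q.1) (some (q.2.1 + 1))) (fun x => x) false).find?
      (fun v => decide (q.2.2 < v))).getD (-1)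

theorem solution_spec : Claim_equal_solution := by
  intro arr queries _ hpre
  show (List.foldl (fun acc q => acc ++ [pvQA arr q]) [] queries)
      = (List.foldl (fun acc q => acc ++ [pvQB arr q]) [] queries)
  rw [PySem.List.foldl_append_singleton_eq_map, PySem.List.foldl_append_singleton_eq_map]
  simp only [List.nil_append]
  apply List.map_congr_left
  intro q hq
  obtain ⟨hs, he, hb⟩ := hpre q hq
  exact pvQuery_eq arr q.1 q.2.1 q.2.2 hs he hb
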